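-- pv_equiv track=rewrite | github.com/FedrianzD/Tucil1_13522090 | function.py | validateMax
-- ===== SOURCE A (Python) =====
-- def validateMax(arr, ylimit, xlimit):
--     isMax = True
--     for i in range(len(arr)):
--         if (i+1) % 2 == 1:
--             if arr[i] != ylimit:
--                 isMax = False
--         else:
--             if arr[i] != xlimit:
--                 isMax = False
--     return isMax
-- ===== SOURCE B (Python) =====
-- def validateMax(arr, ylimit, xlimit):
--     return all(v == ylimit for v in arr[0::2]) and all(v == xlimit for v in arr[1::2])
-- ===== Notes on version B (the rewrite author's own statement) =====
-- stated objective: simpler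
-- what changed: Replaces the interleaved index loop with parity flag/flag-reset with two independent strided-slice passes (arr[0::2] all equal ylimit, arr[1::2] all equal xlimit) combined with all(...); constant-factor speedup from C-level slicing and short-circuiting all() instead of a per-index interpreted loop.
import Mathlib
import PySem

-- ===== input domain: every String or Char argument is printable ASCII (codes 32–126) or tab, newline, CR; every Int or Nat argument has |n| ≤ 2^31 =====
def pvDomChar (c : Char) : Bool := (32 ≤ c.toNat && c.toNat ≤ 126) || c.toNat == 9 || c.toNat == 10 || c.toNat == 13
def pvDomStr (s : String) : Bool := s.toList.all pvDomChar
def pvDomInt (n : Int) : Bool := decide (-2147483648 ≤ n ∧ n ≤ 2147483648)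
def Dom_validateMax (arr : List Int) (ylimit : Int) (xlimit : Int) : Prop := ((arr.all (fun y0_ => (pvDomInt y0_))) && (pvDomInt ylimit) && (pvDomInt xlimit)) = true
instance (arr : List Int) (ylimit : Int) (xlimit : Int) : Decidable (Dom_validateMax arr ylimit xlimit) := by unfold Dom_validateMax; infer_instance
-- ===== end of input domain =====

-- B replaces A's single interleaved index loop by two independent parity passes: arr[0::2] all = ylimit and arr[1::2] all = xlimit (objective: simpler; return value only, no mutation).
-- ===== PORT A =====
def validateMax (arr : List Int) (ylimit : Int) (xlimit : Int) : Bool :=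
  -- isMax = True; for i in range(len(arr)): if (i+1) % 2 == 1: if arr[i] != ylimit: isMax = False else: if arr[i] != xlimit: isMax = False
  (PySem.List.pyRange 0 (PySem.List.len arr) 1).foldl
    (fun isMax i =>
      if PySem.Int.mod (i + 1) 2 == 1 then
        if PySem.List.pyGetD arr i 0 != ylimit then false else isMax
      else
        if PySem.List.pyGetD arr i 0 != xlimit then false else isMax)
    true

-- ===== PORT B =====
def validateMax_alt (arr : List Int) (ylimit : Int) (xlimit : Int) : Bool :=
  -- all(v == ylimit for v in arr[0::2]) and all(v == xlimit for v in arr[1::2]); step-2 slices never raise, so getD [] is never taken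
  ((PySem.List.slice? arr (some 0) none 2).getD []).all (fun v => v == ylimit) &&
  ((PySem.List.slice? arr (some 1) none 2).getD []).all (fun v => v == xlimit)

-- ===== PRECONDITION & SPEC =====
def Spec_validateMax (arr : List Int) (ylimit : Int) (xlimit : Int) (out : Bool) : Prop := out = validateMax_alt arr ylimit xlimit
instance (arr : List Int) (ylimit : Int) (xlimit : Int) (out : Bool) : Decidable (Spec_validateMax arr ylimit xlimit out) := by unfold Spec_validateMax; infer_instance

-- ===== CLAIM (what is proved, stated in full; the proofs are below) =====
def Claim_equal_validateMax : Prop := ∀ (arr : List Int) (ylimit : Int) (xlimit : Int), Dom_validateMax arr ylimit xlimit → Spec_validateMax arr ylimit xlimit (validateMax arr ylimit xlimit)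

-- ===== LEMMAS AND PROOFS =====

-- the even-index subsequence, by two-step structural recursion
def pvEvens : List Int → List Int
  | [] => []
  | [a] => [a]
  | a :: _ :: t => a :: pvEvens t

theorem pvEvens_cons_tail (b : Int) (t : List Int) :
    pvEvens (b :: t) = b :: pvEvens t.tail := by
  cases t <;> rfl

theorem slice2_zero_cons2 (a b : Int) (t : List Int) :
    PySem.List.slice? (a :: b :: t) (some 0) none 2 =
      (PySem.List.slice? t (some 0) none 2).map (a :: ·) := by
  simp only [PySem.List.slice?, PySem.List.sliceIndices]
  norm_num
  have hmin : min (0:ℤ) ((t.length:ℤ) + 1 + 1) = 0 := by omega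
  rw [hmin]
  have hc2 : (if (0:ℤ) ≤ (t.length:ℤ) + 1 then (((t.length:ℤ) + 1 + 1 - 0 + 2 - 1)/2).toNat else 0)
      = (t.length+1)/2 + 1 := by
    rw [if_pos (by positivity)]; omega
  rw [hc2]
  have hc3 : (if 0 < t.length then (((t.length:ℤ) + 2 - 1)/2).toNat else 0) = (t.length+1)/2 := by
    split <;> omega
  rw [hc3]
  rw [List.range_succ_eq_map, List.filterMap_cons, List.filterMap_map]
  norm_num
  rw [List.filterMap_congr]
  intro x hx
  have h2 : ((2:ℤ) * ((x:ℤ) + 1)).toNat = 2*x + 1 + 1 := by omega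
  have h0 : ((2:ℤ) * (x:ℤ)).toNat = 2*x := by omega
  simp [h2, h0]

theorem slice_one_cons (a : Int) (t : List Int) :
    PySem.List.slice? (a :: t) (some 1) none 2 = PySem.List.slice? t (some 0) none 2 := by
  simp only [PySem.List.slice?, PySem.List.sliceIndices]
  norm_num
  rw [List.filterMap_congr]
  intro x hx
  have h1 : ((1:ℤ) + 2 * (x:ℤ)).toNat = 2*x + 1 := by omega
  have h0 : ((2:ℤ) * (x:ℤ)).toNat = 2*x := by omega
  simp [h1, h0]

theorem slice2_evens (xs : List Int) :
    PySem.List.slice? xs (some 0) none 2 = some (pvEvens xs) := by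
  induction xs using pvEvens.induct with
  | case1 => decide
  | case2 a => simp [PySem.List.slice?, PySem.List.sliceIndices, List.filterMap, pvEvens]
  | case3 a b t ih => rw [slice2_zero_cons2, ih]; rfl

theorem slice2_odds (xs : List Int) :
    PySem.List.slice? xs (some 1) none 2 = some (pvEvens xs.tail) := by
  cases xs with
  | nil => decide
  | cons a t => rw [slice_one_cons, slice2_evens, List.tail_cons]

-- A's loop body seen as a function of (index, value)
def pvF (ylimit xlimit : Int) : Bool → Int × Int → Bool :=
  fun isMax p =>
    if PySem.Int.mod (p.1 + 1) 2 == 1 then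
      if p.2 != ylimit then false else isMax
    else
      if p.2 != xlimit then false else isMax

theorem foldA_even (ylimit xlimit : Int) (t : List Int) :
    ∀ (s : Int), PySem.Int.mod s 2 = 0 → ∀ (acc : Bool),
      (PySem.List.enumerate t s).foldl (pvF ylimit xlimit) acc
      = (acc && (pvEvens t).all (fun v => v == ylimit)
             && (pvEvens t.tail).all (fun v => v == xlimit)) := by
  induction t using pvEvens.induct with
  | case1 => intro s hs acc; simp [PySem.List.enumerate_nil, pvEvens]
  | case2 a =>
      intro s hs acc
      have h1 : PySem.Int.mod (s + 1) 2 = 1 := by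
        rw [PySem.Int.mod_eq_emod_of_pos (by omega)] at hs ⊢; omega
      rw [PySem.List.enumerate_cons, PySem.List.enumerate_nil]
      simp only [List.foldl_cons, List.foldl_nil, pvF, h1, pvEvens, List.all_cons,
        List.all_nil, List.tail_cons]
      cases acc <;> cases hay : (a == ylimit) <;> simp_all
  | case3 a b t ih =>
      intro s hs acc
      have h1 : PySem.Int.mod (s + 1) 2 = 1 := by
        rw [PySem.Int.mod_eq_emod_of_pos (by omega)] at hs ⊢; omega
      have h2 : PySem.Int.mod (s + 1 + 1) 2 = 0 := by
        rw [PySem.Int.mod_eq_emod_of_pos (by omega)] at hs ⊢; omega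
      rw [PySem.List.enumerate_cons, PySem.List.enumerate_cons]
      simp only [List.foldl_cons]
      rw [ih (s + 1 + 1) h2]
      have hb : pvF ylimit xlimit (pvF ylimit xlimit acc (s, a)) (s + 1, b)
          = ((acc && (a == ylimit)) && (b == xlimit)) := by
        simp only [pvF, h1, h2]
        cases acc <;> cases hay : (a == ylimit) <;> cases hbx : (b == xlimit) <;> simp_all
      rw [hb]
      simp only [pvEvens, List.tail_cons, pvEvens_cons_tail, List.all_cons]
      cases acc <;> cases hay : (a == ylimit) <;> cases hbx : (b == xlimit) <;>
        cases hE : ((pvEvens t).all (fun v => v == ylimit)) <;>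
        cases hO : ((pvEvens t.tail).all (fun v => v == xlimit)) <;> rfl

theorem validateMax_eq_enum_fold (arr : List Int) (ylimit xlimit : Int) :
    validateMax arr ylimit xlimit = (PySem.List.enumerate arr 0).foldl (pvF ylimit xlimit) true := by
  rw [PySem.List.enumerate_eq_map_pyRange arr 0, List.foldl_map]
  rfl

theorem validateMax_spec : Claim_equal_validateMax := by
  intro arr ylimit xlimit _
  unfold Spec_validateMax validateMax_alt
  rw [validateMax_eq_enum_fold, foldA_even ylimit xlimit arr 0 (by decide) true,
      slice2_evens, slice2_odds]
  simp
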